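-- pv_equiv track=rewrite | github.com/festion/mcp-servers | mcp-servers/proxmox-mcp-server/src/proxmox_mcp/security.py | _get_operation_category
-- ===== SOURCE A (Python) =====
-- from typing import Dict, List, Optional, Any
--
-- def _get_operation_category(operation: str) -> Optional[str]:
--     """Determine the category of an operation."""
--
--     operation_categories = {
--         'vm': ['vm_list', 'vm_status', 'vm_start', 'vm_stop', 'vm_restart', 'vm_delete', 'vm_create'],
--         'storage': ['storage_list', 'storage_status', 'storage_cleanup', 'storage_optimize'],
--         'snapshot': ['snapshot_list', 'snapshot_create', 'snapshot_delete', 'snapshot_cleanup'],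
--         'backup': ['backup_list', 'backup_create', 'backup_delete', 'backup_cleanup'],
--         'system': ['system_info', 'node_status', 'health_assessment', 'system_update'],
--     }
--
--     for category, operations in operation_categories.items():
--         if operation in operations:
--             return category
--
--     return None
-- ===== SOURCE B (Python) =====
-- # Flat reverse-lookup table: operation -> category, one O(1) dict lookup per call.
-- _OPERATION_TO_CATEGORY = {
--     'vm_list': 'vm', 'vm_status': 'vm', 'vm_start': 'vm', 'vm_stop': 'vm',
--     'vm_restart': 'vm', 'vm_delete': 'vm', 'vm_create': 'vm',
--     'storage_list': 'storage', 'storage_status': 'storage',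
--     'storage_cleanup': 'storage', 'storage_optimize': 'storage',
--     'snapshot_list': 'snapshot', 'snapshot_create': 'snapshot',
--     'snapshot_delete': 'snapshot', 'snapshot_cleanup': 'snapshot',
--     'backup_list': 'backup', 'backup_create': 'backup',
--     'backup_delete': 'backup', 'backup_cleanup': 'backup',
--     'system_info': 'system', 'node_status': 'system',
--     'health_assessment': 'system', 'system_update': 'system',
-- }
--
-- def _get_operation_category(operation: str):
--     """Determine the category of an operation."""
--     return _OPERATION_TO_CATEGORY.get(operation)
-- ===== Notes on version B (the rewrite author's own statement) =====
-- stated objective: idiomatic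
-- what changed: Replaces the per-call loop that scans each category's operation list with a single flat literal operation-to-category dict, so the function body is one dict .get lookup with no loop at all.
import Mathlib
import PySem

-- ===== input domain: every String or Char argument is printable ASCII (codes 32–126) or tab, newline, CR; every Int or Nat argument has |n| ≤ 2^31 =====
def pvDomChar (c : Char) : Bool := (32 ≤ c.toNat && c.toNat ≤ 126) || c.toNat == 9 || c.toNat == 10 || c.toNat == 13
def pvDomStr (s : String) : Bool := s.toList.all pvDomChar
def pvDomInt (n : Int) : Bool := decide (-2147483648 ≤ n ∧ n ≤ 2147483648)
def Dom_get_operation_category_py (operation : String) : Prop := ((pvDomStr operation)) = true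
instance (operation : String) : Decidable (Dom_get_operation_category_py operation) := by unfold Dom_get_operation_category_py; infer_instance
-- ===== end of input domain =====

-- B replaces A's per-call scan over each category's operation list with a flat
-- literal operation->category dict and a single lookup (idiomatic; same cost class).

-- ===== PORT A =====
-- the dict literal of A, in insertion order
def pvOpCategories : List (String × List String) := [
  ("vm", ["vm_list", "vm_status", "vm_start", "vm_stop", "vm_restart", "vm_delete", "vm_create"]),
  ("storage", ["storage_list", "storage_status", "storage_cleanup", "storage_optimize"]),
  ("snapshot", ["snapshot_list", "snapshot_create", "snapshot_delete", "snapshot_cleanup"]),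
  ("backup", ["backup_list", "backup_create", "backup_delete", "backup_cleanup"]),
  ("system", ["system_info", "node_status", "health_assessment", "system_update"])
]

-- 'for category, operations in operation_categories.items(): if operation in operations: return category'
def pvScanCats (operation : String) : List (String × List String) → Option String
  | [] => none
  | (category, operations) :: rest =>
    if operations.contains operation then some category else pvScanCats operation rest

def get_operation_category_py (operation : String) : Option String :=
  pvScanCats operation pvOpCategories

-- ===== PORT B =====
-- Source B's flat literal dict _OPERATION_TO_CATEGORY
def pvOperationToCategory : PySem.Dict String String := PySem.Dict.mk [
  ("vm_list", "vm"), ("vm_status", "vm"), ("vm_start", "vm"), ("vm_stop", "vm"),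
  ("vm_restart", "vm"), ("vm_delete", "vm"), ("vm_create", "vm"),
  ("storage_list", "storage"), ("storage_status", "storage"),
  ("storage_cleanup", "storage"), ("storage_optimize", "storage"),
  ("snapshot_list", "snapshot"), ("snapshot_create", "snapshot"),
  ("snapshot_delete", "snapshot"), ("snapshot_cleanup", "snapshot"),
  ("backup_list", "backup"), ("backup_create", "backup"),
  ("backup_delete", "backup"), ("backup_cleanup", "backup"),
  ("system_info", "system"), ("node_status", "system"),
  ("health_assessment", "system"), ("system_update", "system")]

def get_operation_category_py_alt (operation : String) : Option String :=
  pvOperationToCategory.get? operation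

-- ===== PRECONDITION & SPEC =====
def Spec_get_operation_category_py (operation : String) (out : Option String) : Prop := out = get_operation_category_py_alt operation
instance (operation : String) (out : Option String) : Decidable (Spec_get_operation_category_py operation out) := by unfold Spec_get_operation_category_py; infer_instance

-- ===== CLAIM (what is proved, stated in full; the proofs are below) =====
def Claim_equal_get_operation_category_py : Prop := ∀ (operation : String), Dom_get_operation_category_py operation → Spec_get_operation_category_py operation (get_operation_category_py operation)

-- ===== LEMMAS AND PROOFS =====

-- ===== VERDICT (by name: the statement is the Claim_ definition above) =====
theorem get_operation_category_py_spec : Claim_equal_get_operation_category_py := by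
  intro operation _
  unfold Spec_get_operation_category_py
  by_cases h0 : operation = "vm_list"
  · subst h0; decide
  by_cases h1 : operation = "vm_status"
  · subst h1; decide
  by_cases h2 : operation = "vm_start"
  · subst h2; decide
  by_cases h3 : operation = "vm_stop"
  · subst h3; decide
  by_cases h4 : operation = "vm_restart"
  · subst h4; decide
  by_cases h5 : operation = "vm_delete"
  · subst h5; decide
  by_cases h6 : operation = "vm_create"
  · subst h6; decide
  by_cases h7 : operation = "storage_list"
  · subst h7; decide
  by_cases h8 : operation = "storage_status"
  · subst h8; decide
  by_cases h9 : operation = "storage_cleanup"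
  · subst h9; decide
  by_cases h10 : operation = "storage_optimize"
  · subst h10; decide
  by_cases h11 : operation = "snapshot_list"
  · subst h11; decide
  by_cases h12 : operation = "snapshot_create"
  · subst h12; decide
  by_cases h13 : operation = "snapshot_delete"
  · subst h13; decide
  by_cases h14 : operation = "snapshot_cleanup"
  · subst h14; decide
  by_cases h15 : operation = "backup_list"
  · subst h15; decide
  by_cases h16 : operation = "backup_create"
  · subst h16; decide
  by_cases h17 : operation = "backup_delete"
  · subst h17; decide
  by_cases h18 : operation = "backup_cleanup"
  · subst h18; decide
  by_cases h19 : operation = "system_info"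
  · subst h19; decide
  by_cases h20 : operation = "node_status"
  · subst h20; decide
  by_cases h21 : operation = "health_assessment"
  · subst h21; decide
  by_cases h22 : operation = "system_update"
  · subst h22; decide
  simp only [get_operation_category_py, get_operation_category_py_alt]
  simp [pvScanCats, pvOpCategories, pvOperationToCategory, PySem.Dict.get?, h0, h1, h2, h3, h4, h5, h6, h7, h8, h9, h10, h11, h12, h13, h14, h15, h16, h17, h18, h19, h20, h21, h22]
  exact ⟨fun h => h0 h.symm, fun h => h1 h.symm, fun h => h2 h.symm, fun h => h3 h.symm, fun h => h4 h.symm, fun h => h5 h.symm, fun h => h6 h.symm, fun h => h7 h.symm, fun h => h8 h.symm, fun h => h9 h.symm, fun h => h10 h.symm, fun h => h11 h.symm, fun h => h12 h.symm, fun h => h13 h.symm, fun h => h14 h.symm, fun h => h15 h.symm, fun h => h16 h.symm, fun h => h17 h.symm, fun h => h18 h.symm, fun h => h19 h.symm, fun h => h20 h.symm, fun h => h21 h.symm, fun h => h22 h.symm⟩
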